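-- pv_equiv track=rewrite | github.com/TizianoBonacci/TW_Script | analisi_monete_conio.py | monete_e_risorse_necessarie_per_n_nobili
-- ===== SOURCE A (Python) =====
-- def monete_e_risorse_necessarie_per_n_nobili(n_monete_esistenti, n_nobili_da_produrre):
--     # Calcola il numero di nobili esistenti e le monete in eccesso
--     n_nobili_esistenti = 0
--     while n_monete_esistenti >= n_nobili_esistenti + 1:
--         n_nobili_esistenti += 1
--         n_monete_esistenti -= n_nobili_esistenti
--
--     # Calcola il numero di monete necessarie per produrre ulteriori N nobili
--     monete_necessarie = 0
--     for i in range(n_nobili_esistenti + 1, n_nobili_esistenti + n_nobili_da_produrre + 1):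
--         monete_necessarie += i
--
--     # Sottrai le monete in eccesso esistenti
--     monete_necessarie -= n_monete_esistenti
--
--     # Calcola le risorse necessarie
--     legno_necessario = monete_necessarie * 28000
--     argilla_necessaria = monete_necessarie * 30000
--     ferro_necessario = monete_necessarie * 25000
--
--     return n_nobili_esistenti, n_monete_esistenti, monete_necessarie, legno_necessario, argilla_necessaria, ferro_necessario
-- ===== SOURCE B (Python) =====
-- def monete_e_risorse_necessarie_per_n_nobili(n_monete_esistenti, n_nobili_da_produrre):
--     n = n_monete_esistenti
--     if n >= 0:
--         # binary search for the largest k with k*(k+1)//2 <= n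
--         lo, hi = 0, n + 1  # invariant: T(lo) <= n < T(hi)
--         while hi - lo > 1:
--             mid = (lo + hi) // 2
--             if mid * (mid + 1) // 2 <= n:
--                 lo = mid
--             else:
--                 hi = mid
--         k = lo
--         resto = n - k * (k + 1) // 2
--     else:
--         k = 0
--         resto = n
--     m = n_nobili_da_produrre
--     tot = (k * m + m * (m + 1) // 2 if m > 0 else 0) - resto
--     return k, resto, tot, tot * 28000, tot * 30000, tot * 25000
-- ===== Notes on version B (the rewrite author's own statement) =====
-- stated objective: faster
-- what changed: Replaces the one-coin-at-a-time subtraction loop (O(sqrt n) iterations) and the explicit summation loop (O(m)) with a binary search for the largest k with k(k+1)/2 <= n plus arithmetic-series closed forms.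
import Mathlib
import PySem

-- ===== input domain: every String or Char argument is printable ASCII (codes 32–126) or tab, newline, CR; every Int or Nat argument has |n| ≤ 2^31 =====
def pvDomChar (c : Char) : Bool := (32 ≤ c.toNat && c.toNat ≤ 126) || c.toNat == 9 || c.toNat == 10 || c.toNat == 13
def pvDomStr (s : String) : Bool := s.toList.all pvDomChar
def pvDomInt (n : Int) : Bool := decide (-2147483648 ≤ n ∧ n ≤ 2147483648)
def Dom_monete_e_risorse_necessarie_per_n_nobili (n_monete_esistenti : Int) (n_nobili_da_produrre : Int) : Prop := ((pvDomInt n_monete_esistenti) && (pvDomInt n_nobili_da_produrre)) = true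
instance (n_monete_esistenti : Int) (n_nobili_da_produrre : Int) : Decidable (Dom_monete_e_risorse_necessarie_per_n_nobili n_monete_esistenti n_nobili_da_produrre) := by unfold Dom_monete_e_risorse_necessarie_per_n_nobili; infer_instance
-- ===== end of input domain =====

-- B replaces A's coin-by-coin while-loop and summation for-loop by a binary search for the
-- triangular-number index plus arithmetic-series closed forms (objective: faster).

-- ===== PORT A =====
-- the while-loop of A: while n_monete >= n_nobili + 1: n_nobili += 1; n_monete -= n_nobili
def pvLoopA (n_monete : Int) (n_nobili : Int) : Int × Int :=
  if n_monete ≥ n_nobili + 1 then pvLoopA (n_monete - (n_nobili + 1)) (n_nobili + 1)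
  else (n_monete, n_nobili)
termination_by ((-n_nobili).toNat, n_monete.toNat)
decreasing_by
  by_cases h0 : n_nobili < 0
  · exact Prod.Lex.left _ _ (by omega)
  · have he : (-(n_nobili + 1)).toNat = (-n_nobili).toNat := by omega
    rw [he]
    exact Prod.Lex.right _ (by omega)

def monete_e_risorse_necessarie_per_n_nobili (n_monete_esistenti : Int) (n_nobili_da_produrre : Int) : List Int :=
  let p := pvLoopA n_monete_esistenti 0
  let n_monete := p.1
  let n_nobili_esistenti := p.2
  -- for i in range(n_nobili_esistenti + 1, n_nobili_esistenti + n_nobili_da_produrre + 1): monete_necessarie += i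
  let monete0 := (PySem.List.pyRange (n_nobili_esistenti + 1) (n_nobili_esistenti + n_nobili_da_produrre + 1) 1).foldl (fun acc i => acc + i) 0
  let monete_necessarie := monete0 - n_monete
  [n_nobili_esistenti, n_monete, monete_necessarie,
   monete_necessarie * 28000, monete_necessarie * 30000, monete_necessarie * 25000]

-- ===== PORT B =====
-- binary search of Source B: invariant T(lo) <= n < T(hi); returns lo when hi - lo <= 1
def pvBis (n lo hi : Int) : Int :=
  if hgt : hi - lo > 1 then
    let mid := PySem.Int.floordiv (lo + hi) 2
    if PySem.Int.floordiv (mid * (mid + 1)) 2 ≤ n then pvBis n mid hi else pvBis n lo mid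
  else lo
termination_by (hi - lo).toNat
decreasing_by
  · have h1 : lo + 1 ≤ PySem.Int.floordiv (lo + hi) 2 :=
      (PySem.Int.le_floordiv_iff_mul_le (by norm_num)).2 (by omega)
    omega
  · have h2 : PySem.Int.floordiv (lo + hi) 2 < hi :=
      (PySem.Int.floordiv_lt_iff_lt_mul (by norm_num)).2 (by omega)
    omega

def monete_e_risorse_necessarie_per_n_nobili_alt (n_monete_esistenti : Int) (n_nobili_da_produrre : Int) : List Int :=
  let n := n_monete_esistenti
  let k := if n ≥ 0 then pvBis n 0 (n + 1) else 0
  let resto := if n ≥ 0 then n - PySem.Int.floordiv (k * (k + 1)) 2 else n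
  let m := n_nobili_da_produrre
  let tot := (if m > 0 then k * m + PySem.Int.floordiv (m * (m + 1)) 2 else 0) - resto
  [k, resto, tot, tot * 28000, tot * 30000, tot * 25000]

-- ===== PRECONDITION & SPEC =====
def Spec_monete_e_risorse_necessarie_per_n_nobili (n_monete_esistenti : Int) (n_nobili_da_produrre : Int) (out : List Int) : Prop := out = monete_e_risorse_necessarie_per_n_nobili_alt n_monete_esistenti n_nobili_da_produrre
instance (n_monete_esistenti : Int) (n_nobili_da_produrre : Int) (out : List Int) : Decidable (Spec_monete_e_risorse_necessarie_per_n_nobili n_monete_esistenti n_nobili_da_produrre out) := by unfold Spec_monete_e_risorse_necessarie_per_n_nobili; infer_instance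

-- ===== CLAIM (what is proved, stated in full; the proofs are below) =====
def Claim_equal_monete_e_risorse_necessarie_per_n_nobili : Prop := ∀ (n_monete_esistenti : Int) (n_nobili_da_produrre : Int), Dom_monete_e_risorse_necessarie_per_n_nobili n_monete_esistenti n_nobili_da_produrre → Spec_monete_e_risorse_necessarie_per_n_nobili n_monete_esistenti n_nobili_da_produrre (monete_e_risorse_necessarie_per_n_nobili n_monete_esistenti n_nobili_da_produrre)

-- ===== LEMMAS AND PROOFS =====

-- characterization of A's while-loop (started at n_nobili = k ≥ 0)
lemma pvLoopA_spec (n k : Int) (hk : 0 ≤ k) :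
    k ≤ (pvLoopA n k).2 ∧
    2 * (pvLoopA n k).1 = 2 * n + k * (k + 1) - (pvLoopA n k).2 * ((pvLoopA n k).2 + 1) ∧
    (pvLoopA n k).1 < (pvLoopA n k).2 + 1 ∧
    ((pvLoopA n k).2 = k ∨ 0 ≤ (pvLoopA n k).1) := by
  fun_induction pvLoopA n k with
  | case1 n k hcond ih =>
    have ih' := ih (by omega)
    constructor
    · omega
    constructor
    · have := ih'.2.1
      nlinarith [ih'.2.1]
    constructor
    · exact ih'.2.2.1
    · right
      rcases ih'.2.2.2 with h | h
      · have h2 := ih'.2.1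
        rw [h] at h2
        nlinarith [h2]
      · omega
  | case2 n k hcond =>
    exact ⟨le_refl _, by ring, by omega, Or.inl rfl⟩

lemma two_dvd_mul_succ (m : Int) : 2 ∣ m * (m + 1) := by
  rcases Int.even_mul_succ_self m with ⟨c, hc⟩
  exact ⟨c, by omega⟩

lemma floordiv_half (m : Int) : 2 * PySem.Int.floordiv (m * (m + 1)) 2 = m * (m + 1) := by
  rw [PySem.Int.floordiv_eq_ediv_of_pos (by norm_num)]
  have := two_dvd_mul_succ m
  omega

-- characterization of B's binary search
lemma pvBis_spec (n : Int) : ∀ lo hi : Int, lo < hi → 0 ≤ lo →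
    lo * (lo + 1) ≤ 2 * n → 2 * n < hi * (hi + 1) →
    lo ≤ pvBis n lo hi ∧ pvBis n lo hi * (pvBis n lo hi + 1) ≤ 2 * n ∧
      2 * n < (pvBis n lo hi + 1) * (pvBis n lo hi + 2) := by
  intro lo hi
  fun_induction pvBis n lo hi with
  | case1 lo hi hgt mid hle ih =>
    intro _ hlo hL hH
    have hmid1 : lo + 1 ≤ mid :=
      (PySem.Int.le_floordiv_iff_mul_le (by norm_num)).2 (by omega)
    have hmid2 : mid < hi :=
      (PySem.Int.floordiv_lt_iff_lt_mul (by norm_num)).2 (by omega)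
    have hmval := floordiv_half mid
    obtain ⟨x1, x2, x3⟩ := ih (by omega) (by omega) (by omega) hH
    exact ⟨by omega, x2, x3⟩
  | case2 lo hi hgt mid hle ih =>
    intro _ hlo hL hH
    have hmid1 : lo + 1 ≤ mid :=
      (PySem.Int.le_floordiv_iff_mul_le (by norm_num)).2 (by omega)
    have hmid2 : mid < hi :=
      (PySem.Int.floordiv_lt_iff_lt_mul (by norm_num)).2 (by omega)
    have hmval := floordiv_half mid
    exact ih (by omega) hlo hL (by omega)
  | case3 lo hi hgt =>
    intro hlt hlo hL hH
    refine ⟨le_refl _, hL, ?_⟩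
    have : hi = lo + 1 := by omega
    subst this
    nlinarith [hH]

-- the unique k ≥ 0 with k(k+1) ≤ 2n < (k+1)(k+2)
lemma tri_unique (a b n : Int) (ha : 0 ≤ a) (hb : 0 ≤ b)
    (h1 : a * (a + 1) ≤ 2 * n) (h2 : 2 * n < (a + 1) * (a + 2))
    (h3 : b * (b + 1) ≤ 2 * n) (h4 : 2 * n < (b + 1) * (b + 2)) : a = b := by
  by_contra hne
  rcases lt_or_gt_of_ne hne with h | h
  · have : (a + 1) * (a + 2) ≤ b * (b + 1) := by nlinarith
    omega
  · have : (b + 1) * (b + 2) ≤ a * (a + 1) := by nlinarith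
    omega

-- closed form for the summation loop of A
lemma sum_pyRange (a : Int) : ∀ j : Nat,
    2 * ((PySem.List.pyRange a (a + j) 1).foldl (fun acc i => acc + i) 0) = j * (2 * a + j - 1) := by
  intro j
  induction j with
  | zero => simp [PySem.List.pyRange_one_eq_nil (le_refl a)]
  | succ j ih =>
    have hs : a + ((j : Int) + 1) = (a + j) + 1 := by ring
    push_cast
    rw [hs, PySem.List.pyRange_one_succ_right (by omega), List.foldl_append]
    simp only [List.foldl]
    push_cast at ih
    linear_combination ih

-- ===== VERDICT (by name: the statement is the Claim_ definition above) =====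
theorem monete_e_risorse_necessarie_per_n_nobili_spec : Claim_equal_monete_e_risorse_necessarie_per_n_nobili := by
  intro n m _
  unfold Spec_monete_e_risorse_necessarie_per_n_nobili
  unfold monete_e_risorse_necessarie_per_n_nobili monete_e_risorse_necessarie_per_n_nobili_alt
  simp only []
  -- names for A's loop result
  have hA := pvLoopA_spec n 0 (le_refl 0)
  set r := (pvLoopA n 0).1 with hr
  set kA := (pvLoopA n 0).2 with hkA
  obtain ⟨hk0, hsum, hlt, hor⟩ := hA
  -- B's k and resto
  by_cases hn : n ≥ 0
  · -- nonnegative coins: binary search applies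
    have hB := pvBis_spec n 0 (n + 1) (by omega) (le_refl 0) (by omega) (by nlinarith)
    set kB := pvBis n 0 (n + 1) with hkB
    obtain ⟨hkB0, hB1, hB2⟩ := hB
    -- A's loop result satisfies the same bracketing
    have hr0 : 0 ≤ r := by
      rcases hor with h | h
      · rw [h] at hsum; omega
      · exact h
    have hA1 : kA * (kA + 1) ≤ 2 * n := by omega
    have hA2 : 2 * n < (kA + 1) * (kA + 2) := by nlinarith
    have hkeq : kA = kB := tri_unique kA kB n hk0 hkB0 hA1 hA2 hB1 hB2
    have hresto : r = n - PySem.Int.floordiv (kB * (kB + 1)) 2 := by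
      have hfd := floordiv_half kB
      rw [← hkeq] at hfd
      rw [← hkeq]
      omega
    -- the sums
    have htot : (PySem.List.pyRange (kA + 1) (kA + m + 1) 1).foldl (fun acc i => acc + i) 0
        = (if m > 0 then kB * m + PySem.Int.floordiv (m * (m + 1)) 2 else 0) := by
      by_cases hm : m > 0
      · have hms := sum_pyRange (kA + 1) m.toNat
        have hcast : ((m.toNat : Int)) = m := by omega
        rw [hcast] at hms
        have hend : kA + 1 + m = kA + m + 1 := by ring
        rw [hend] at hms
        have hfd := floordiv_half m
        simp only [hm, if_pos]
        rw [← hkeq]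
        nlinarith [hms, hfd]
      · simp only [hm, if_false]
        rw [PySem.List.pyRange_one_eq_nil (by omega)]
        rfl
    rw [hkeq] at htot
    simp only [hn, if_pos, hkeq, hresto, htot]
  · -- negative coins: loop never runs
    have hstop : pvLoopA n 0 = (n, 0) := by
      rw [pvLoopA]
      simp only [if_neg (by omega : ¬ n ≥ (0 : Int) + 1)]
    have hrn : r = n := by rw [hr, hstop]
    have hkn : kA = 0 := by rw [hkA, hstop]
    have htot : (PySem.List.pyRange (kA + 1) (kA + m + 1) 1).foldl (fun acc i => acc + i) 0
        = (if m > 0 then 0 * m + PySem.Int.floordiv (m * (m + 1)) 2 else 0) := by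
      by_cases hm : m > 0
      · have hms := sum_pyRange (kA + 1) m.toNat
        have hcast : ((m.toNat : Int)) = m := by omega
        rw [hcast] at hms
        have hend : kA + 1 + m = kA + m + 1 := by ring
        rw [hend] at hms
        have hfd := floordiv_half m
        simp only [hm, if_pos]
        nlinarith [hms, hfd, hkn]
      · simp only [hm, if_false]
        rw [PySem.List.pyRange_one_eq_nil (by omega)]
        rfl
    simp only [if_neg hn]
    rw [htot, hkn, hrn]
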